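/- GENERATED by farm/mkstatement.py from design/units.tsv (unit `DGifGetImageHeader.1`) and the assertions of Gif/Spec/Seg_DGifGetImageHeader.lean — do not edit.
   THE STATEMENT of the proof unit `DGifGetImageHeader.1`: segment 1 of `DGifGetImageHeader` (28 instructions; entries 0x108e49;
   exits 0x108ecd,0x108e78; ranges 0x108e49-0x108e78,0x108e95-0x108ecd)
   takes each of its entry assertions to one of its exit assertions (`Gif.Spec.DGifGetImageHeader.Seg1`), given the contracts of its callees.
   What the names mean: ProgX/Base/Spec/Basic.lean (the shared hypotheses), Gif/Spec/Seg_DGifGetImageHeader.lean (the assertions). The theorem to prove: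
   `theorem DGifGetImageHeader_1_ok : Gif.Spec.DGifGetImageHeader_1.Statement`. -/
import Gif.Code
import Gif.Dec.All
import Gif.Labels
import Gif.Spec.Reader
import Gif.Spec.Seg_DGifGetImageHeader
namespace Gif.Spec.DGifGetImageHeader_1
open X86 X86.User Asan

/-- The statement of unit `DGifGetImageHeader.1`. -/
def Statement : Prop :=
  ∀ (Lay : Layout) (_hLay : Lay.hi = 0x1000000) (μ : Microarch) (_hμ : UserX.MicroOK μ) (u₀ : State)
    (_hcode : HasCodeNat Lay u₀ Gif.L.DGifGetImageHeader.entry Gif.Code.code_DGifGetImageHeader.nat Gif.L.DGifGetImageHeader.size)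
    (_h_DGifGetWord : ∀ (H : Heap) (rest : List Obj) (frames : List (Nat × FrameLayout)) (F : Forest) (R : Rd), Calls Lay μ ProgX.Base.WayInv (ProgX.Base.conv u₀) Gif.L.DGifGetWord.entry (Gif.Spec.DGifGetWord.spec H rest frames F R))
    (_h_asan_load8_noabort : Asan.SmallCheck Lay μ ProgX.Base.WayInv (ProgX.Base.CodeOK u₀) [.rax, .rcx, .rdx] 8 ProgX.Base.L.__asan_load8_noabort.entry)
    (_h_asan_load4_noabort : Asan.SmallCheck Lay μ ProgX.Base.WayInv (ProgX.Base.CodeOK u₀) [.rax, .rcx, .rdx] 4 ProgX.Base.L.__asan_load4_noabort.entry)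
    (_h_asan_store4_noabort : Asan.SmallCheck Lay μ ProgX.Base.WayInv (ProgX.Base.CodeOK u₀) [.rax, .rcx, .rdx] 4 ProgX.Base.L.__asan_store4_noabort.entry),
    Gif.Spec.DGifGetImageHeader.Seg1 Lay μ u₀

end Gif.Spec.DGifGetImageHeader_1
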